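-- pv_equiv track=rewrite | github.com/sifaka-ai/sifaka | sifaka/critics/meta_rewarding.py | _parse_judgment
-- ===== SOURCE A (Python) =====
-- from typing import Any, Dict, List, Optional
--
-- def _parse_judgment(judgment: str) -> tuple[List[str], List[str]]:
--     """Parse judgment text to extract issues and suggestions.
--
--     Args:
--         judgment: The judgment text to parse.
--
--     Returns:
--         A tuple of (issues, suggestions) lists.
--     """
--     issues = []
--     suggestions = []
--
--     # Simple parsing logic for structured feedback
--     in_weaknesses = False
--     in_missing = False
--
--     for line in judgment.split("\n"):
--         line = line.strip()
--
--         # Section headers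
--         if line.lower().startswith(("strengths:", "judgment strengths:")):
--             in_weaknesses = False
--             in_missing = False
--             continue
--         elif line.lower().startswith(("weaknesses:", "judgment weaknesses:")):
--             in_weaknesses = True
--             in_missing = False
--             continue
--         elif line.lower().startswith("missing aspects:"):
--             in_weaknesses = False
--             in_missing = True
--             continue
--         elif line.lower().startswith(
--             ("overall assessment:", "revised assessment:", "meta-judgment:")
--         ):
--             in_weaknesses = False
--             in_missing = False
--             continue
--         elif not line or line.startswith("#"):
--             continue
--
--         # Extract content from sections
--         if in_weaknesses and line.startswith("-"):
--             issues.append(line[1:].strip())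
--         elif (in_weaknesses or in_missing) and line.startswith("-"):
--             suggestions.append(f"Address: {line[1:].strip()}")
--
--     # Fallback: extract from general content if no structured format found
--     if not issues and not suggestions:
--         judgment_lower = judgment.lower()
--         if any(word in judgment_lower for word in ["weakness", "issue", "problem", "improve"]):
--             issues.append("Issues identified in meta-rewarding evaluation")
--         if any(word in judgment_lower for word in ["suggest", "should", "could", "recommend"]):
--             suggestions.append("See meta-rewarding feedback for improvement suggestions")
--
--     return issues, suggestions
-- ===== SOURCE B (Python) =====
-- from typing import List
--
-- # Header-prefix table, checked in the same order as the original parser.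
-- _HEADERS = [
--     (("strengths:", "judgment strengths:"), "other"),
--     (("weaknesses:", "judgment weaknesses:"), "weaknesses"),
--     (("missing aspects:",), "missing"),
--     (("overall assessment:", "revised assessment:", "meta-judgment:"), "other"),
-- ]
--
--
-- def _label(low: str):
--     for prefixes, lab in _HEADERS:
--         if low.startswith(prefixes):
--             return lab
--     return None
--
--
-- def _parse_judgment(judgment: str) -> tuple[List[str], List[str]]:
--     # Phase 1: segment the text into ordered (label, bullet_items) blocks.
--     blocks = [("other", [])]
--     for raw in judgment.split("\n"):
--         line = raw.strip()
--         lab = _label(line.lower())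
--         if lab is not None:
--             blocks.append((lab, []))
--         elif line.startswith("-"):
--             blocks[-1][1].append(line[1:].strip())
--     # Phase 2: extract issues / suggestions from the labelled blocks.
--     issues = [item for lab, items in blocks if lab == "weaknesses" for item in items]
--     suggestions = [
--         f"Address: {item}" for lab, items in blocks if lab == "missing" for item in items
--     ]
--     # Fallback: extract from general content if no structured format found.
--     if not issues and not suggestions:
--         low = judgment.lower()
--         if any(word in low for word in ["weakness", "issue", "problem", "improve"]):
--             issues.append("Issues identified in meta-rewarding evaluation")
--         if any(word in low for word in ["suggest", "should", "could", "recommend"]):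
--             suggestions.append("See meta-rewarding feedback for improvement suggestions")
--     return issues, suggestions
-- ===== Notes on version B (the rewrite author's own statement) =====
-- stated objective: alternative
-- what changed: Replaces A's stateful flag-driven single loop (in_weaknesses/in_missing booleans) by a two-phase pipeline: first segment the lines into an ordered list of labelled bullet blocks via a header-prefix table, then extract issues/suggestions from the blocks by label.
import Mathlib
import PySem

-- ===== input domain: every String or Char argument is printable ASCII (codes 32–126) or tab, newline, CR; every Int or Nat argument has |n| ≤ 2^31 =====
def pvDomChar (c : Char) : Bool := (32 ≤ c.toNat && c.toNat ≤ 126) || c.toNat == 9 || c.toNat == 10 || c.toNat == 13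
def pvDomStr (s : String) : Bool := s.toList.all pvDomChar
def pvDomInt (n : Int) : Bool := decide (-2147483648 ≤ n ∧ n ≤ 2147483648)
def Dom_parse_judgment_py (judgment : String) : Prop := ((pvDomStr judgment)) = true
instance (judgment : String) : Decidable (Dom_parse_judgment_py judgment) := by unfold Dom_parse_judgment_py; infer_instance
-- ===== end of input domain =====

-- B replaces A's flag-driven single loop by a two-phase pipeline (segment into labelled
-- bullet blocks, then extract by label); same return value, no speed claim.


-- judgment.split("\n") (exact: Python str.split on a one-char separator)
def pjLines (judgment : String) : List String :=
  (PySem.Chars.splitOn judgment.toList ['\n']).map String.ofList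

-- f"Address: {x}" (exact: Python str concatenation on code points)
def pjAddress (x : String) : String := String.ofList ("Address: ".toList ++ x.toList)

-- ===== PORT A =====
structure PJState where
  issues : List String
  suggestions : List String
  inW : Bool
  inM : Bool

-- one iteration of A's for-loop over judgment.split("\n")
def parseALine (st : PJState) (raw : String) : PJState :=
  let line := PySem.Str.strip raw
  let low := PySem.Str.lower line
  if PySem.Str.startswith low "strengths:" || PySem.Str.startswith low "judgment strengths:" then
    { st with inW := false, inM := false }
  else if PySem.Str.startswith low "weaknesses:" || PySem.Str.startswith low "judgment weaknesses:" then
    { st with inW := true, inM := false }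
  else if PySem.Str.startswith low "missing aspects:" then
    { st with inW := false, inM := true }
  else if PySem.Str.startswith low "overall assessment:" || (PySem.Str.startswith low "revised assessment:" || PySem.Str.startswith low "meta-judgment:") then
    { st with inW := false, inM := false }
  else if PySem.Str.len line == 0 || PySem.Str.startswith line "#" then
    st
  else if st.inW && PySem.Str.startswith line "-" then
    { st with issues := st.issues ++ [PySem.Str.strip (PySem.Str.slice line (some 1) none)] }
  else if (st.inW || st.inM) && PySem.Str.startswith line "-" then
    { st with suggestions := st.suggestions ++ [pjAddress (PySem.Str.strip (PySem.Str.slice line (some 1) none))] }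
  else st

def parse_judgment_py (judgment : String) : List String × List String :=
  let fin : PJState := (pjLines judgment).foldl parseALine ⟨[], [], false, false⟩
  let issues := fin.issues
  let suggestions := fin.suggestions
  if issues.isEmpty && suggestions.isEmpty then
    let low := PySem.Str.lower judgment
    let issues := if ["weakness", "issue", "problem", "improve"].any (fun w => PySem.Str.isIn w low) then
        issues ++ ["Issues identified in meta-rewarding evaluation"] else issues
    let suggestions := if ["suggest", "should", "could", "recommend"].any (fun w => PySem.Str.isIn w low) then
        suggestions ++ ["See meta-rewarding feedback for improvement suggestions"] else suggestions
    (issues, suggestions)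
  else (issues, suggestions)

-- ===== PORT B =====
def pjHeaders : List (List String × String) :=
  [(["strengths:", "judgment strengths:"], "other"),
   (["weaknesses:", "judgment weaknesses:"], "weaknesses"),
   (["missing aspects:"], "missing"),
   (["overall assessment:", "revised assessment:", "meta-judgment:"], "other")]

def pjLabel (low : String) : Option String :=
  (pjHeaders.find? (fun h => h.1.any (fun p => PySem.Str.startswith low p))).map (·.2)

-- blocks[-1][1].append(item)
def pjAppendLast (blocks : List (String × List String)) (item : String) : List (String × List String) :=
  match blocks with
  | [] => []
  | [b] => [(b.1, b.2 ++ [item])]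
  | b :: rest => b :: pjAppendLast rest item

-- phase 1: one line of the segmentation loop
def pjSegStep (blocks : List (String × List String)) (raw : String) : List (String × List String) :=
  let line := PySem.Str.strip raw
  match pjLabel (PySem.Str.lower line) with
  | some lab => blocks ++ [(lab, [])]
  | none =>
      if PySem.Str.startswith line "-" then
        pjAppendLast blocks (PySem.Str.strip (PySem.Str.slice line (some 1) none))
      else blocks

def parse_judgment_py_alt (judgment : String) : List String × List String :=
  let blocks : List (String × List String) := (pjLines judgment).foldl pjSegStep [("other", [])]
  let issues := (blocks.filter (fun b => b.1 == "weaknesses")).flatMap (·.2)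
  let suggestions := (blocks.filter (fun b => b.1 == "missing")).flatMap (fun b => b.2.map pjAddress)
  if issues.isEmpty && suggestions.isEmpty then
    let low := PySem.Str.lower judgment
    let issues := if ["weakness", "issue", "problem", "improve"].any (fun w => PySem.Str.isIn w low) then
        issues ++ ["Issues identified in meta-rewarding evaluation"] else issues
    let suggestions := if ["suggest", "should", "could", "recommend"].any (fun w => PySem.Str.isIn w low) then
        suggestions ++ ["See meta-rewarding feedback for improvement suggestions"] else suggestions
    (issues, suggestions)
  else (issues, suggestions)

-- ===== PRECONDITION & SPEC =====
def Spec_parse_judgment_py (judgment : String) (out : List String × List String) : Prop := out = parse_judgment_py_alt judgment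
instance (judgment : String) (out : List String × List String) : Decidable (Spec_parse_judgment_py judgment out) := by unfold Spec_parse_judgment_py; infer_instance

-- ===== CLAIM (what is proved, stated in full; the proofs are below) =====
def Claim_equal_parse_judgment_py : Prop := ∀ (judgment : String), Dom_parse_judgment_py judgment → Spec_parse_judgment_py judgment (parse_judgment_py judgment)

-- ===== LEMMAS AND PROOFS =====

def pjIssuesOf (bs : List (String × List String)) : List String :=
  (bs.filter (fun b => b.1 == "weaknesses")).flatMap (·.2)

def pjSuggsOf (bs : List (String × List String)) : List String :=
  (bs.filter (fun b => b.1 == "missing")).flatMap (fun b => b.2.map pjAddress)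

def pjLast (bs : List (String × List String)) : String :=
  ((bs.getLast?).map (·.1)).getD "other"

def PJInv (st : PJState) (bs : List (String × List String)) : Prop :=
  bs ≠ [] ∧ pjIssuesOf bs = st.issues ∧ pjSuggsOf bs = st.suggestions ∧
    pjLast bs = (if st.inW then "weaknesses" else if st.inM then "missing" else "other")

theorem pjIssuesOf_concat (bs : List (String × List String)) (lab : String) :
    pjIssuesOf (bs ++ [(lab, [])]) = pjIssuesOf bs := by
  simp only [pjIssuesOf, List.filter_append, List.flatMap_append]
  cases h : lab == "weaknesses" <;> simp [h]

theorem pjSuggsOf_concat (bs : List (String × List String)) (lab : String) :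
    pjSuggsOf (bs ++ [(lab, [])]) = pjSuggsOf bs := by
  simp only [pjSuggsOf, List.filter_append, List.flatMap_append]
  cases h : lab == "missing" <;> simp [h]

theorem pjLast_concat (bs : List (String × List String)) (lab : String) (l : List String) :
    pjLast (bs ++ [(lab, l)]) = lab := by
  simp [pjLast, List.getLast?_append]

theorem pjAppendLast_ne_nil (bs : List (String × List String)) (x : String) (h : bs ≠ []) :
    pjAppendLast bs x ≠ [] := by
  cases bs with
  | nil => exact absurd rfl h
  | cons b rest => cases rest <;> simp [pjAppendLast]

theorem pjLast_appendLast (bs : List (String × List String)) (x : String) (h : bs ≠ []) :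
    pjLast (pjAppendLast bs x) = pjLast bs := by
  induction bs with
  | nil => exact absurd rfl h
  | cons b rest ih =>
    cases rest with
    | nil => simp [pjAppendLast, pjLast]
    | cons c t =>
        obtain ⟨d, u, hdu⟩ : ∃ d u, pjAppendLast (c :: t) x = d :: u := by
          cases hc : pjAppendLast (c :: t) x with
          | nil => exact absurd hc (pjAppendLast_ne_nil _ _ (by simp))
          | cons d u => exact ⟨d, u, rfl⟩
        have ihv := ih (by simp)
        simp only [pjAppendLast, pjLast, hdu] at ihv ⊢
        rw [List.getLast?_cons_cons, List.getLast?_cons_cons]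
        exact ihv

theorem pjIssuesOf_appendLast (bs : List (String × List String)) (x : String) (h : bs ≠ []) :
    pjIssuesOf (pjAppendLast bs x) =
      pjIssuesOf bs ++ (if pjLast bs == "weaknesses" then [x] else []) := by
  induction bs with
  | nil => exact absurd rfl h
  | cons b rest ih =>
    obtain ⟨bl, bi⟩ := b
    cases rest with
    | nil =>
        simp only [pjAppendLast, pjIssuesOf, pjLast, List.getLast?_singleton, Option.map_some,
          Option.getD_some]
        by_cases hb : (bl == "weaknesses") = true <;> simp [hb]
    | cons c t =>
        have ih' := ih (by simp)
        simp only [pjAppendLast, pjIssuesOf, List.filter_cons] at ih' ⊢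
        rw [pjLast, List.getLast?_cons_cons, ← pjLast]
        by_cases hb : (bl == "weaknesses") = true <;> simp [hb, ih']

theorem pjSuggsOf_appendLast (bs : List (String × List String)) (x : String) (h : bs ≠ []) :
    pjSuggsOf (pjAppendLast bs x) =
      pjSuggsOf bs ++ (if pjLast bs == "missing" then [pjAddress x] else []) := by
  induction bs with
  | nil => exact absurd rfl h
  | cons b rest ih =>
    obtain ⟨bl, bi⟩ := b
    cases rest with
    | nil =>
        simp only [pjAppendLast, pjSuggsOf, pjLast, List.getLast?_singleton, Option.map_some,
          Option.getD_some]
        by_cases hb : (bl == "missing") = true <;> simp [hb]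
    | cons c t =>
        have ih' := ih (by simp)
        simp only [pjAppendLast, pjSuggsOf, List.filter_cons] at ih' ⊢
        rw [pjLast, List.getLast?_cons_cons, ← pjLast]
        by_cases hb : (bl == "missing") = true <;> simp [hb, ih']

-- a line starting with "#" (or an empty line) does not start with "-"
theorem pjNotDash_of_hash (line : String) (h : PySem.Str.startswith line "#" = true) :
    PySem.Str.startswith line "-" = false := by
  by_contra hc
  rw [Bool.not_eq_false, PySem.Str.startswith_eq, PySem.Chars.startswith_iff] at hc
  rw [PySem.Str.startswith_eq, PySem.Chars.startswith_iff] at h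
  obtain ⟨t1, e1⟩ := h
  obtain ⟨t2, e2⟩ := hc
  have h1 : line.toList.head? = some '#' := by rw [← e1]; rfl
  have h2 : line.toList.head? = some '-' := by rw [← e2]; rfl
  rw [h1] at h2
  simp at h2

theorem pjNotDash_of_empty (line : String) (h : (PySem.Str.len line == 0) = true) :
    PySem.Str.startswith line "-" = false := by
  by_contra hc
  rw [Bool.not_eq_false, PySem.Str.startswith_eq, PySem.Chars.startswith_iff] at hc
  obtain ⟨t2, e2⟩ := hc
  rw [PySem.Str.len_eq] at h
  simp only [beq_iff_eq, Nat.cast_eq_zero, List.length_eq_zero_iff] at h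
  rw [h] at e2
  simp at e2

set_option maxHeartbeats 1000000 in
theorem pjInv_step (st : PJState) (bs : List (String × List String)) (raw : String)
    (h : PJInv st bs) : PJInv (parseALine st raw) (pjSegStep bs raw) := by
  obtain ⟨hne, hi, hs, hl⟩ := h
  unfold parseALine pjSegStep pjLabel pjHeaders
  simp only [List.find?_cons, List.find?_nil, List.any_cons, List.any_nil, Bool.or_false]
  cases hc1 : (PySem.Str.startswith (PySem.Str.lower (PySem.Str.strip raw)) "strengths:" ||
      PySem.Str.startswith (PySem.Str.lower (PySem.Str.strip raw)) "judgment strengths:")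
  case true =>
    simp only [if_true, Option.map_some]
    exact ⟨by simp, by rw [pjIssuesOf_concat]; exact hi, by rw [pjSuggsOf_concat]; exact hs,
      by rw [pjLast_concat]; rfl⟩
  case false =>
  simp only [Bool.false_eq_true, if_false]
  cases hc2 : (PySem.Str.startswith (PySem.Str.lower (PySem.Str.strip raw)) "weaknesses:" ||
      PySem.Str.startswith (PySem.Str.lower (PySem.Str.strip raw)) "judgment weaknesses:")
  case true =>
    simp only [if_true, Option.map_some]
    exact ⟨by simp, by rw [pjIssuesOf_concat]; exact hi, by rw [pjSuggsOf_concat]; exact hs,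
      by rw [pjLast_concat]; rfl⟩
  case false =>
  simp only [Bool.false_eq_true, if_false]
  cases hc3 : PySem.Str.startswith (PySem.Str.lower (PySem.Str.strip raw)) "missing aspects:"
  case true =>
    simp only [if_true, Option.map_some]
    exact ⟨by simp, by rw [pjIssuesOf_concat]; exact hi, by rw [pjSuggsOf_concat]; exact hs,
      by rw [pjLast_concat]; rfl⟩
  case false =>
  simp only [Bool.false_eq_true, if_false]
  cases hc4 : (PySem.Str.startswith (PySem.Str.lower (PySem.Str.strip raw)) "overall assessment:" ||
      (PySem.Str.startswith (PySem.Str.lower (PySem.Str.strip raw)) "revised assessment:" ||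
       PySem.Str.startswith (PySem.Str.lower (PySem.Str.strip raw)) "meta-judgment:"))
  case true =>
    simp only [if_true, Option.map_some]
    exact ⟨by simp, by rw [pjIssuesOf_concat]; exact hi, by rw [pjSuggsOf_concat]; exact hs,
      by rw [pjLast_concat]; rfl⟩
  case false =>
  simp only [Bool.false_eq_true, if_false, Option.map_none]
  -- no header matched: B takes the bullet branch, A the skip / bullet / fall-through branches
  cases hd : PySem.Str.startswith (PySem.Str.strip raw) "-"
  case false =>
    cases hsk : (PySem.Str.len (PySem.Str.strip raw) == 0 ||
        PySem.Str.startswith (PySem.Str.strip raw) "#")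
    case true =>
      simp only [if_true, Bool.false_eq_true, if_false]
      exact ⟨hne, hi, hs, hl⟩
    case false =>
      simp only [Bool.false_eq_true, if_false, Bool.and_false]
      exact ⟨hne, hi, hs, hl⟩
  case true =>
    have hsk : (PySem.Str.len (PySem.Str.strip raw) == 0 ||
        PySem.Str.startswith (PySem.Str.strip raw) "#") = false := by
      cases hz : (PySem.Str.len (PySem.Str.strip raw) == 0)
      · cases hh : PySem.Str.startswith (PySem.Str.strip raw) "#"
        · simp
        · rw [pjNotDash_of_hash _ hh] at hd; cases hd
      · rw [pjNotDash_of_empty _ hz] at hd; cases hd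
    rw [hsk]
    simp only [Bool.false_eq_true, if_false, Bool.and_true, if_true]
    cases hw : st.inW
    case true =>
      rw [hw] at hl
      simp only [if_true] at hl ⊢
      refine ⟨pjAppendLast_ne_nil _ _ hne, ?_, ?_, ?_⟩
      · rw [pjIssuesOf_appendLast _ _ hne, hl, hi]; simp
      · rw [pjSuggsOf_appendLast _ _ hne, hl, hs]; simp
      · rw [pjLast_appendLast _ _ hne, hl]; simp
    case false =>
    rw [hw] at hl
    simp only [Bool.false_eq_true, if_false, Bool.false_or]
    cases hm : st.inM
    case true =>
      rw [hm] at hl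
      simp only [Bool.false_eq_true, if_false, if_true] at hl ⊢
      refine ⟨pjAppendLast_ne_nil _ _ hne, ?_, ?_, ?_⟩
      · rw [pjIssuesOf_appendLast _ _ hne, hl, hi]; simp
      · rw [pjSuggsOf_appendLast _ _ hne, hl, hs]; simp
      · rw [pjLast_appendLast _ _ hne, hl]; simp
    case false =>
      rw [hm] at hl
      simp only [Bool.false_eq_true, if_false] at hl ⊢
      refine ⟨pjAppendLast_ne_nil _ _ hne, ?_, ?_, ?_⟩
      · rw [pjIssuesOf_appendLast _ _ hne, hl, hi]; simp
      · rw [pjSuggsOf_appendLast _ _ hne, hl, hs]; simp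
      · rw [pjLast_appendLast _ _ hne, hl]; simp [hw, hm]

theorem pjInv_foldl (lines : List String) (st : PJState) (bs : List (String × List String))
    (h : PJInv st bs) : PJInv (lines.foldl parseALine st) (lines.foldl pjSegStep bs) := by
  induction lines generalizing st bs with
  | nil => exact h
  | cons l ls ih =>
      rw [List.foldl_cons, List.foldl_cons]
      exact ih _ _ (pjInv_step st bs l h)

-- ===== VERDICT (by name: the statement is the Claim_ definition above) =====
theorem parse_judgment_py_spec : Claim_equal_parse_judgment_py := by
  intro judgment _
  obtain ⟨-, hi, hs, -⟩ := pjInv_foldl (pjLines judgment) ⟨[], [], false, false⟩ [("other", [])]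
    (by unfold PJInv; decide)
  simp only [pjIssuesOf, pjSuggsOf] at hi hs
  unfold Spec_parse_judgment_py parse_judgment_py parse_judgment_py_alt
  simp only [hi, hs]
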